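-- pv_equiv track=rewrite | github.com/lihansen/SeqAlign_DP | efficient_3.py | dp_efficient
-- ===== SOURCE A (Python) =====
-- GAP_PENALTY = 30
--
-- MISMATCH_PENALTY = {
--     0: 0,  # same chars' diff == 0
--     ord('C') - ord('A'): 110,
--     ord('G') - ord('A'): 48,
--     ord('T') - ord('A'): 94,
--     ord('G') - ord('C'): 118,
--     ord('T') - ord('C'): 48,
--     ord('T') - ord('G'): 110,
-- }
--
-- def dp_efficient(str1, str2):
--     """
--     Solve Sequence Alignment DAC problem by using dynamic programming
--
--     Returns a list containing all weights of last colum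
--
--     Parameter str1: the first string
--     Precondition: 1 <= len(str1) <= 20000
--
--     Parameter str2: the second string
--     Precondition: 1 <= len(str2) <= 20000
--     """
--     grid = [[0] * 2 for _ in range(len(str1) + 1)]  # initialize 2D array
--     for i in range(len(str1) + 1):  # initialize most-right side
--         grid[i][0] = i * GAP_PENALTY
--
--     for j in range(1, len(str2) + 1):
--         grid[0][1] = j * GAP_PENALTY
--         for i in range(1, len(str1) + 1):
--             key = abs(ord(str1[i - 1]) - ord(str2[j - 1]))  # key in MISMATCH_PENALTY hashmap
--             grid[i][1] = min(
--                 MISMATCH_PENALTY[key] + grid[i - 1][0],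
--                 GAP_PENALTY + grid[i - 1][1],
--                 GAP_PENALTY + grid[i][0]
--             )
--
--         # first colum <- last colum
--         for row in range(len(str1) + 1):
--             grid[row][0] = grid[row][1]
--
--     last_col = []   # get elements from last colum
--     for row in grid:
--         last_col.append(row[-1])
--     return last_col
-- ===== SOURCE B (Python) =====
-- GAP_PENALTY = 30
--
-- MISMATCH_PENALTY = {
--     0: 0,  # same chars' diff == 0
--     ord('C') - ord('A'): 110,
--     ord('G') - ord('A'): 48,
--     ord('T') - ord('A'): 94,
--     ord('G') - ord('C'): 118,
--     ord('T') - ord('C'): 48,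
--     ord('T') - ord('G'): 110,
-- }
--
-- def dp_efficient(str1, str2):
--     """Alignment DP swept row by row over str2, collecting each row's last cell.
--
--     The table is traversed in the transposed order: one row per character of
--     str1, built left to right by appending; the answer list grows as we go.
--     """
--     m = len(str2)
--     row = [j * GAP_PENALTY for j in range(m + 1)]
--     result = [row[m]]
--     for i in range(1, len(str1) + 1):
--         prev = row
--         row = [i * GAP_PENALTY]
--         for j in range(1, m + 1):
--             row.append(min(MISMATCH_PENALTY[abs(ord(str1[i - 1]) - ord(str2[j - 1]))] + prev[j - 1],
--                            GAP_PENALTY + prev[j],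
--                            GAP_PENALTY + row[j - 1]))
--         result.append(row[m])
--     return result
-- ===== Notes on version B (the rewrite author's own statement) =====
-- stated objective: alternative
-- what changed: Transposes the DP sweep: instead of a (len(str1)+1)-row grid of 2-cell rows updated column by column over str2 with a copy-back pass and a final extraction pass, B builds one fresh DP row per character of str1 (left to right over str2, by appending) and collects each row's last cell into the result as it goes; Pre_ excludes inputs where some character-pair code distance is missing from MISMATCH_PENALTY, on which A raises KeyError.
-- intended difference: When str2 is empty and str1 is not, A returns all zeros (its scratch column is never written), while B returns [0, 30, 60, ...] = i*GAP_PENALTY per prefix, the true cost of aligning each prefix of str1 with the empty string, which is the intended value. — e.g. on dp_efficient("A", ""): A returns [0, 0], B returns [0, 30]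
import Mathlib
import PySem

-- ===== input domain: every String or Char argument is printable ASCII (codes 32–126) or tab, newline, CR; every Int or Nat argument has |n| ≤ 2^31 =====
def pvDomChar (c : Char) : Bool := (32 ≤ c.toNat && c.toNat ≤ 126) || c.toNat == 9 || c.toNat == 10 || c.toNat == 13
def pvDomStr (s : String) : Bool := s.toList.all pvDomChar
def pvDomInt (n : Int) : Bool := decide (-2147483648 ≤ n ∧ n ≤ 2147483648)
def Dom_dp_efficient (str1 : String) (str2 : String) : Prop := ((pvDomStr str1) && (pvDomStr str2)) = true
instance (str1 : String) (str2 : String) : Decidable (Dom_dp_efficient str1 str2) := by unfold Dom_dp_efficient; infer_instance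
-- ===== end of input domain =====

-- B sweeps the DP table in the transposed order (one freshly built row per character of str1,
-- collecting each row's last cell), instead of A's column-by-column grid with copy-back.

def GAP_PENALTY : Int := 30

def MISMATCH_PENALTY : PySem.Dict Int Int :=
  PySem.Dict.ofList [(0, 0), (2, 110), (6, 48), (19, 94), (4, 118), (17, 48), (13, 110)]

-- abs(ord(a) - ord(b)), the MISMATCH_PENALTY key
def pvKey (a b : Char) : Int := (((a.toNat : Int) - (b.toNat : Int)).natAbs : Int)

-- MISMATCH_PENALTY[key]; a missing key is a Python KeyError: .getD 0 is only reached outside Pre_dp_efficient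
def pvCost (a b : Char) : Int := (MISMATCH_PENALTY.get? (pvKey a b)).getD 0

-- the three-way min computed for cell (i, j) from its diag/left/up neighbours
def pvCell (s1 s2 : List Char) (j i : Nat) (diag left up : Int) : Int :=
  min (pvCost (s1.getD (i - 1) ' ') (s2.getD (j - 1) ' ') + diag)
      (min (GAP_PENALTY + left) (GAP_PENALTY + up))

-- ===== PORT A =====
-- grid[i][0] = i * GAP_PENALTY  (initialisation loop)
def stepA_init (g : List (Int × Int)) (i : Nat) : List (Int × Int) :=
  g.set i ((i : Int) * GAP_PENALTY, (g.getD i (0, 0)).2)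

-- inner loop body: grid[i][1] = min(...)
def stepA_in (s1 s2 : List Char) (j : Nat) (g : List (Int × Int)) (i : Nat) : List (Int × Int) :=
  g.set i ((g.getD i (0, 0)).1,
    pvCell s1 s2 j i (g.getD (i - 1) (0, 0)).1 (g.getD (i - 1) (0, 0)).2 (g.getD i (0, 0)).1)

-- outer loop body: grid[0][1] = j * GAP_PENALTY; inner loop; copy-back loop
def stepA_out (s1 s2 : List Char) (g : List (Int × Int)) (j : Nat) : List (Int × Int) :=
  let g := g.set 0 ((g.getD 0 (0, 0)).1, (j : Int) * GAP_PENALTY)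
  let g := (List.range' 1 s1.length).foldl (stepA_in s1 s2 j) g
  g.map (fun r => (r.2, r.2))

def dp_efficient (str1 : String) (str2 : String) : List Int :=
  let s1 := str1.toList
  let s2 := str2.toList
  let grid : List (Int × Int) := List.replicate (s1.length + 1) (0, 0)
  let grid := (List.range (s1.length + 1)).foldl stepA_init grid
  let grid := (List.range' 1 s2.length).foldl (stepA_out s1 s2) grid
  grid.map (fun r => r.2)

-- ===== PORT B =====
-- inner loop body: row.append(min(...)); row[j-1] is the cell just appended
def stepB_in (s1 s2 : List Char) (prev : List Int) (i : Nat) (row : List Int) (j : Nat) : List Int :=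
  row ++ [min (pvCost (s1.getD (i - 1) ' ') (s2.getD (j - 1) ' ') + prev.getD (j - 1) 0)
              (min (GAP_PENALTY + prev.getD j 0) (GAP_PENALTY + row.getD (j - 1) 0))]

-- outer loop body over state (result, row): prev = row; build row i from scratch; result.append(row[m])
def stepB_out (s1 s2 : List Char) (st : List Int × List Int) (i : Nat) : List Int × List Int :=
  let prev := st.2
  let row := (List.range' 1 s2.length).foldl (stepB_in s1 s2 prev i) [(i : Int) * GAP_PENALTY]
  (st.1 ++ [row.getD s2.length 0], row)

def dp_efficient_alt (str1 : String) (str2 : String) : List Int :=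
  let s1 := str1.toList
  let s2 := str2.toList
  let row0 : List Int := (List.range (s2.length + 1)).map (fun (j : Nat) => (j : Int) * GAP_PENALTY)
  let st := (List.range' 1 s1.length).foldl (stepB_out s1 s2) ([row0.getD s2.length 0], row0)
  st.1

-- ===== PRECONDITION & SPEC =====
-- Pre_ excludes exactly the inputs on which Python A raises KeyError: some character of str1
-- paired with some character of str2 has a code distance outside the MISMATCH_PENALTY table.
def Pre_dp_efficient (str1 : String) (str2 : String) : Prop :=
  (str1.toList.all (fun c1 => str2.toList.all (fun c2 =>
    ([0, 2, 4, 6, 13, 17, 19] : List Nat).contains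
      ((c1.toNat : Int) - (c2.toNat : Int)).natAbs))) = true
instance (str1 : String) (str2 : String) : Decidable (Pre_dp_efficient str1 str2) := by
  unfold Pre_dp_efficient; infer_instance

def pvWitness_dp_efficient : String × String := ("AC", "GT")

-- When str2 is empty and str1 is not, A returns all zeros (its scratch column is never written),
-- while B returns the true cost i*GAP_PENALTY of aligning each prefix of str1 with the empty
-- string, which is the intended value.
def D_dp_efficient (str1 : String) (str2 : String) : Prop :=
  str2.toList = [] ∧ str1.toList ≠ []
instance (str1 : String) (str2 : String) : Decidable (D_dp_efficient str1 str2) := by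
  unfold D_dp_efficient; infer_instance

def Spec_dp_efficient (str1 : String) (str2 : String) (out : List Int) : Prop :=
  ¬ D_dp_efficient str1 str2 → out = dp_efficient_alt str1 str2
instance (str1 : String) (str2 : String) (out : List Int) : Decidable (Spec_dp_efficient str1 str2 out) := by unfold Spec_dp_efficient; infer_instance

def pvDiffWitness_dp_efficient : String × String := ("A", "")
def pvDiffWitnessOut_dp_efficient : (List Int) × (List Int) := ([0, 0], [0, 30])

-- ===== CLAIM (what is proved, stated in full; the proofs are below) =====
def Claim_unchanged_dp_efficient : Prop := ∀ (str1 : String) (str2 : String), Dom_dp_efficient str1 str2 → Pre_dp_efficient str1 str2 → Spec_dp_efficient str1 str2 (dp_efficient str1 str2)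
def Claim_changed_dp_efficient : Prop := Dom_dp_efficient (pvDiffWitness_dp_efficient.1) (pvDiffWitness_dp_efficient.2) ∧ Pre_dp_efficient (pvDiffWitness_dp_efficient.1) (pvDiffWitness_dp_efficient.2) ∧ D_dp_efficient (pvDiffWitness_dp_efficient.1) (pvDiffWitness_dp_efficient.2) ∧ dp_efficient (pvDiffWitness_dp_efficient.1) (pvDiffWitness_dp_efficient.2) = pvDiffWitnessOut_dp_efficient.1 ∧ dp_efficient_alt (pvDiffWitness_dp_efficient.1) (pvDiffWitness_dp_efficient.2) = pvDiffWitnessOut_dp_efficient.2 ∧ pvDiffWitnessOut_dp_efficient.1 ≠ pvDiffWitnessOut_dp_efficient.2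
def Claim_exact_dp_efficient : Prop := ∀ (str1 : String) (str2 : String), Dom_dp_efficient str1 str2 → Pre_dp_efficient str1 str2 → D_dp_efficient str1 str2 → dp_efficient str1 str2 ≠ dp_efficient_alt str1 str2

-- ===== LEMMAS AND PROOFS =====

-- the DP recurrence both programs fill in: pvD i j = cost of aligning str1[:i] with str2[:j]
def pvD (s1 s2 : List Char) : Nat → Nat → Int
  | 0, j => (j : Int) * GAP_PENALTY
  | (i+1), 0 => (((i+1 : Nat)) : Int) * GAP_PENALTY
  | (i+1), (j+1) => pvCell s1 s2 (j+1) (i+1) (pvD s1 s2 i j) (pvD s1 s2 i (j+1)) (pvD s1 s2 (i+1) j)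
  termination_by i j => (i, j)

lemma pvD_zero (s1 s2 : List Char) (i : Nat) : pvD s1 s2 i 0 = (i : Int) * GAP_PENALTY := by
  cases i <;> simp [pvD]

-- A's column-rolling algorithm written over the state (result, dp-column) — the bridge
-- between A's grid of pairs and the recurrence pvD
def stepC_in (s1 s2 : List Char) (j : Nat) (p : List Int × Int) (i : Nat) : List Int × Int :=
  (p.1.set i (pvCell s1 s2 j i p.2 (p.1.getD (i - 1) 0) (p.1.getD i 0)), p.1.getD i 0)

def stepC_out (s1 s2 : List Char) (st : List Int × List Int) (j : Nat) : List Int × List Int :=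
  let diag := st.2.getD 0 0
  let dp := st.2.set 0 ((j : Int) * GAP_PENALTY)
  let p := (List.range' 1 s1.length).foldl (stepC_in s1 s2 j) (dp, diag)
  (p.1, p.1)

def pvColAlgo (str1 : String) (str2 : String) : List Int :=
  let s1 := str1.toList
  let s2 := str2.toList
  let dp0 : List Int := (List.range (s1.length + 1)).map (fun (i : Nat) => (i : Int) * GAP_PENALTY)
  let result0 : List Int := List.replicate (s1.length + 1) 0
  let st := (List.range' 1 s2.length).foldl (stepC_out s1 s2) (result0, dp0)
  st.1

lemma fst_getD (g : List (Int × Int)) (i : Nat) (h : i < g.length) :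
    (g.getD i (0, 0)).1 = (g.map Prod.fst).getD i 0 := by
  rw [List.getD_eq_getElem _ _ h, List.getD_eq_getElem _ _ (by simpa using h), List.getElem_map]

lemma snd_getD (g : List (Int × Int)) (i : Nat) (h : i < g.length) :
    (g.getD i (0, 0)).2 = (g.map Prod.snd).getD i 0 := by
  rw [List.getD_eq_getElem _ _ h, List.getD_eq_getElem _ _ (by simpa using h), List.getElem_map]

lemma getD_take_lt {l : List Int} {m i : Nat} (h : i < m) (d : Int) :
    (l.take m).getD i d = l.getD i d := by
  rw [List.getD_eq_getElem?_getD, List.getD_eq_getElem?_getD, List.getElem?_take_of_lt h]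

lemma getD_drop (l : List Int) (m i : Nat) (d : Int) :
    (l.drop m).getD i d = l.getD (m + i) d := by
  rw [List.getD_eq_getElem?_getD, List.getD_eq_getElem?_getD, List.getElem?_drop]

lemma initA_eq (m : Nat) (g : List (Int × Int)) (h : m ≤ g.length) :
    (List.range m).foldl stepA_init g
      = (List.range m).map (fun (i : Nat) => (((i : Nat) : Int) * GAP_PENALTY, (g.getD i (0, 0)).2)) ++ g.drop m := by
  induction m with
  | zero => simp
  | succ m ih =>
    have hm : m < g.length := h
    rw [List.range_succ, List.foldl_append, ih (le_of_lt hm), List.map_append]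
    simp only [List.foldl_cons, List.foldl_nil, List.map_cons, List.map_nil, stepA_init]
    have hlenP : ((List.range m).map (fun (i : Nat) => (((i : Nat) : Int) * GAP_PENALTY, (g.getD i (0, 0)).2))).length = m := by simp
    rw [List.getD_append_right _ _ _ _ (by omega), List.set_append]
    simp only [hlenP, lt_irrefl, if_false, Nat.sub_self]
    rw [List.drop_eq_getElem_cons hm, List.set_cons_zero, List.getD_cons_zero,
      List.getD_eq_getElem _ _ hm]
    simp

lemma inner_sim (s1 s2 : List Char) (j k : Nat) (g0 : List (Int × Int)) (hk : k < g0.length) :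
    (((List.range' 1 k).foldl (stepA_in s1 s2 j) g0).map Prod.fst = g0.map Prod.fst) ∧
    ((List.range' 1 k).foldl (stepC_in s1 s2 j)
        (((g0.map Prod.snd).take 1 ++ (g0.map Prod.fst).drop 1), (g0.map Prod.fst).getD 0 0)
      = ((((List.range' 1 k).foldl (stepA_in s1 s2 j) g0).map Prod.snd).take (k + 1)
            ++ (g0.map Prod.fst).drop (k + 1),
          (g0.map Prod.fst).getD k 0)) := by
  induction k with
  | zero => exact ⟨rfl, by simp⟩
  | succ k ih =>
    obtain ⟨hA, hB⟩ := ih (by omega)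
    set gk := (List.range' 1 k).foldl (stepA_in s1 s2 j) g0 with hgk
    have hlen : gk.length = g0.length := by
      have := congrArg List.length hA; simpa using this
    have hk1 : k + 1 < gk.length := by omega
    have e1 : 1 + k = k + 1 := by omega
    rw [List.range'_concat, List.foldl_append, List.foldl_append, ← hgk, hB]
    simp only [List.foldl_cons, List.foldl_nil]
    have hTlen : ((gk.map Prod.snd).take (k + 1)).length = k + 1 := by
      simp; omega
    have hup : ((gk.map Prod.snd).take (k + 1) ++ (g0.map Prod.fst).drop (k + 1)).getD (k + 1) 0
        = (gk.getD (k + 1) (0, 0)).1 := by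
      rw [List.getD_append_right _ _ _ _ (by omega), hTlen, Nat.sub_self,
        getD_drop, Nat.add_zero, ← hA, ← fst_getD _ _ hk1]
    have hleft : ((gk.map Prod.snd).take (k + 1) ++ (g0.map Prod.fst).drop (k + 1)).getD (k + 1 - 1) 0
        = (gk.getD (k + 1 - 1) (0, 0)).2 := by
      have h1 : k + 1 - 1 = k := by omega
      rw [h1, List.getD_append _ _ _ _ (by omega), getD_take_lt (by omega),
        ← snd_getD _ _ (by omega)]
    have hdiag : (g0.map Prod.fst).getD k 0 = (gk.getD (k + 1 - 1) (0, 0)).1 := by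
      have h1 : k + 1 - 1 = k := by omega
      rw [h1, ← hA, ← fst_getD _ _ (by omega)]
    have e2 : 1 + 1 * k = k + 1 := by omega
    simp only [e2]
    simp only [stepA_in, stepC_in, hup, hleft, hdiag, Prod.mk.injEq]
    refine ⟨?_, ?_, ?_⟩
    · rw [List.map_set, fst_getD _ _ hk1, hA,
        List.getD_eq_getElem _ _ (by simpa using hk), List.set_getElem_self]
    · conv_rhs => rw [List.map_set, List.take_set, List.take_add_one,
        List.getElem?_map, List.getElem?_eq_getElem hk1]
      simp only [Option.map_some, Option.toList_some]
      conv_rhs => rw [List.set_append]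
      rw [hTlen, if_neg (lt_irrefl _), Nat.sub_self, List.set_cons_zero]
      rw [List.set_append, hTlen, if_neg (lt_irrefl _), Nat.sub_self]
      rw [List.drop_eq_getElem_cons (by simpa using hk), List.set_cons_zero]
      simp
    · rw [fst_getD _ _ hk1, hA]

lemma outer_step_sim (s1 s2 : List Char) (j : Nat) (g : List (Int × Int))
    (hlen : g.length = s1.length + 1) :
    ((stepA_out s1 s2 g j).length = s1.length + 1) ∧
    (stepC_out s1 s2 (g.map Prod.snd, g.map Prod.fst) j
      = ((stepA_out s1 s2 g j).map Prod.snd, (stepA_out s1 s2 g j).map Prod.fst)) := by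
  have hg0 : 0 < g.length := by omega
  set g0 := g.set 0 ((g.getD 0 (0, 0)).1, (j : Int) * GAP_PENALTY) with hg0def
  have hfst : g0.map Prod.fst = g.map Prod.fst := by
    rw [hg0def, List.map_set, fst_getD _ _ hg0,
      List.getD_eq_getElem _ _ (by simpa using hg0), List.set_getElem_self]
  have hg0len : g0.length = g.length := by simp [hg0def]
  have hdp : (g.map Prod.fst).set 0 ((j : Int) * GAP_PENALTY)
      = (g0.map Prod.snd).take 1 ++ (g0.map Prod.fst).drop 1 := by
    rw [hfst, hg0def, List.map_set]
    cases g with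
    | nil => simp at hg0
    | cons a l => simp
  obtain ⟨hA, hB⟩ := inner_sim s1 s2 j s1.length g0 (by omega)
  set gk := (List.range' 1 s1.length).foldl (stepA_in s1 s2 j) g0 with hgk
  have hklen : gk.length = g.length := by
    have := congrArg List.length hA
    simpa [hg0len] using this
  have hfull : ((gk.map Prod.snd).take (s1.length + 1) ++ (g0.map Prod.fst).drop (s1.length + 1))
      = gk.map Prod.snd := by
    rw [List.take_of_length_le (by simp [hklen, hlen]),
      List.drop_eq_nil_of_le (by simp [hg0len, hlen]), List.append_nil]
  rw [hfst] at hfull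
  constructor
  · simp only [stepA_out, ← hg0def, ← hgk, List.length_map]
    rw [hklen, hlen]
  · simp only [stepC_out, stepA_out, ← hg0def, ← hgk]
    rw [← hdp, ← hfst] at hB
    simp only [hfst] at hB
    rw [hB, hfull]
    simp [List.map_map, Function.comp]

lemma outer_fold_sim (s1 s2 : List Char) (js : List Nat) (g : List (Int × Int))
    (hlen : g.length = s1.length + 1) :
    ((js.foldl (stepA_out s1 s2) g).length = s1.length + 1) ∧
    (js.foldl (stepC_out s1 s2) (g.map Prod.snd, g.map Prod.fst)
      = ((js.foldl (stepA_out s1 s2) g).map Prod.snd,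
         (js.foldl (stepA_out s1 s2) g).map Prod.fst)) := by
  induction js generalizing g with
  | nil => exact ⟨hlen, rfl⟩
  | cons j js ih =>
    obtain ⟨h1, h2⟩ := outer_step_sim s1 s2 j g hlen
    simp only [List.foldl_cons, h2]
    exact ih (stepA_out s1 s2 g j) h1

-- A equals the column-rolling bridge algorithm
lemma a_eq_col (str1 str2 : String) : dp_efficient str1 str2 = pvColAlgo str1 str2 := by
  simp only [dp_efficient, pvColAlgo]
  set s1 := str1.toList
  set s2 := str2.toList
  have hinit : (List.range (s1.length + 1)).foldl stepA_init (List.replicate (s1.length + 1) (0, 0))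
      = (List.range (s1.length + 1)).map (fun (i : Nat) => (((i : Nat) : Int) * GAP_PENALTY, (0 : Int))) := by
    rw [initA_eq _ _ (by simp), List.drop_eq_nil_of_le (by simp), List.append_nil]
    apply List.map_congr_left
    intro i hi
    simp at hi
    rw [List.getD_eq_getElem _ _ (by simpa using hi), List.getElem_replicate]
  rw [hinit]
  set g1 := (List.range (s1.length + 1)).map (fun (i : Nat) => (((i : Nat) : Int) * GAP_PENALTY, (0 : Int))) with hg1
  have hlen1 : g1.length = s1.length + 1 := by simp [hg1]
  have hfst1 : g1.map Prod.fst = (List.range (s1.length + 1)).map (fun (i : Nat) => (i : Int) * GAP_PENALTY) := by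
    rw [hg1, List.map_map]; rfl
  have hsnd1 : g1.map Prod.snd = List.replicate (s1.length + 1) (0 : Int) := by
    rw [hg1, List.map_map]; simp [Function.comp_def]
  obtain ⟨h1, h2⟩ := outer_fold_sim s1 s2 (List.range' 1 s2.length) g1 hlen1
  rw [hfst1, hsnd1] at h2
  rw [h2]

-- getD of a mapped range
lemma gmr (f : Nat → Int) (n k : Nat) (h : k < n) (d : Int) :
    ((List.range n).map f).getD k d = f k := by
  rw [List.getD_eq_getElem _ _ (by simpa using h)]
  simp

-- set into a mapped range
lemma set_map_range (f : Nat → Int) (n k : Nat) (v : Int) :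
    ((List.range n).map f).set k v = (List.range n).map (fun i => if i = k then v else f i) := by
  apply List.ext_getElem (by simp)
  intro i h1 h2
  simp only [List.getElem_set, List.getElem_map, List.getElem_range]
  rcases eq_or_ne k i with h | h
  · simp [h]
  · rw [if_neg h, if_neg (fun hh => h hh.symm)]

-- ===== the column algorithm computes pvD =====

lemma col_inner (s1 s2 : List Char) (j k : Nat) (hk : k ≤ s1.length) :
    (List.range' 1 k).foldl (stepC_in s1 s2 (j + 1))
      ((List.range (s1.length + 1)).map (fun i => if i = 0 then pvD s1 s2 i (j + 1) else pvD s1 s2 i j),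
        pvD s1 s2 0 j)
    = ((List.range (s1.length + 1)).map (fun i => if i ≤ k then pvD s1 s2 i (j + 1) else pvD s1 s2 i j),
        pvD s1 s2 k j) := by
  induction k with
  | zero =>
    simp only [List.range'_zero, List.foldl_nil]
    congr 1
    apply List.map_congr_left
    intro i _
    rcases Nat.eq_zero_or_pos i with h | h
    · simp [h]
    · rw [if_neg (by omega), if_neg (by omega)]
  | succ k ih =>
    have hk' : k ≤ s1.length := by omega
    rw [List.range'_concat, List.foldl_append, ih hk']
    have e2 : 1 + 1 * k = k + 1 := by omega
    simp only [List.foldl_cons, List.foldl_nil, e2, stepC_in]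
    have hget1 : ((List.range (s1.length + 1)).map (fun i => if i ≤ k then pvD s1 s2 i (j + 1) else pvD s1 s2 i j)).getD (k + 1 - 1) 0
        = pvD s1 s2 k (j + 1) := by
      have h1 : k + 1 - 1 = k := by omega
      rw [h1, gmr _ _ _ (by omega)]
      simp
    have hget2 : ((List.range (s1.length + 1)).map (fun i => if i ≤ k then pvD s1 s2 i (j + 1) else pvD s1 s2 i j)).getD (k + 1) 0
        = pvD s1 s2 (k + 1) j := by
      rw [gmr _ _ _ (by omega)]
      simp
    rw [hget1, hget2, set_map_range]
    have hcell : pvCell s1 s2 (j + 1) (k + 1) (pvD s1 s2 k j) (pvD s1 s2 k (j + 1)) (pvD s1 s2 (k + 1) j)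
        = pvD s1 s2 (k + 1) (j + 1) := by
      rw [pvD]
    rw [hcell]
    congr 1
    apply List.map_congr_left
    intro i _
    by_cases h : i = k + 1
    · simp [h]
    · by_cases h2 : i ≤ k
      · simp [h, h2, Nat.le_succ_of_le h2]
      · have : ¬ i ≤ k + 1 := by omega
        simp [h, h2, this]

lemma col_outer (s1 s2 : List Char) (t : Nat) :
    (List.range' 1 t).foldl (stepC_out s1 s2)
      (List.replicate (s1.length + 1) 0,
       (List.range (s1.length + 1)).map (fun i => pvD s1 s2 i 0))
    = ((if t = 0 then List.replicate (s1.length + 1) 0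
        else (List.range (s1.length + 1)).map (fun i => pvD s1 s2 i t)),
       (List.range (s1.length + 1)).map (fun i => pvD s1 s2 i t)) := by
  induction t with
  | zero => simp
  | succ t ih =>
    rw [List.range'_concat, List.foldl_append, ih]
    have e2 : 1 + 1 * t = t + 1 := by omega
    simp only [List.foldl_cons, List.foldl_nil, e2, stepC_out]
    have hdiag : ((List.range (s1.length + 1)).map (fun i => pvD s1 s2 i t)).getD 0 0
        = pvD s1 s2 0 t := gmr _ _ _ (by omega) 0
    have hset : ((List.range (s1.length + 1)).map (fun i => pvD s1 s2 i t)).set 0 (((t + 1 : Nat) : Int) * GAP_PENALTY)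
        = (List.range (s1.length + 1)).map (fun i => if i = 0 then pvD s1 s2 i (t + 1) else pvD s1 s2 i t) := by
      rw [set_map_range]
      apply List.map_congr_left
      intro i _
      by_cases h : i = 0
      · subst h; simp [pvD]
      · simp [h]
    rw [hdiag, hset, col_inner s1 s2 t s1.length (le_refl _)]
    have hfull : (List.range (s1.length + 1)).map (fun i => if i ≤ s1.length then pvD s1 s2 i (t + 1) else pvD s1 s2 i t)
        = (List.range (s1.length + 1)).map (fun i => pvD s1 s2 i (t + 1)) := by
      apply List.map_congr_left
      intro i hi
      simp at hi
      rw [if_pos hi]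
    simp [hfull]

lemma col_eq (str1 str2 : String) :
    pvColAlgo str1 str2
    = if str2.toList.length = 0 then List.replicate (str1.toList.length + 1) 0
      else (List.range (str1.toList.length + 1)).map (fun i => pvD str1.toList str2.toList i str2.toList.length) := by
  simp only [pvColAlgo]
  have hdp0 : (List.range (str1.toList.length + 1)).map (fun (i : Nat) => (i : Int) * GAP_PENALTY)
      = (List.range (str1.toList.length + 1)).map (fun i => pvD str1.toList str2.toList i 0) := by
    apply List.map_congr_left
    intro i _
    rw [pvD_zero]
  rw [hdp0, col_outer]

-- ===== B computes pvD =====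

lemma b_inner (s1 s2 : List Char) (i k : Nat) (hk : k ≤ s2.length) :
    (List.range' 1 k).foldl
      (stepB_in s1 s2 ((List.range (s2.length + 1)).map (fun j => pvD s1 s2 i j)) (i + 1))
      [(((i + 1 : Nat)) : Int) * GAP_PENALTY]
    = (List.range (k + 1)).map (fun j => pvD s1 s2 (i + 1) j) := by
  induction k with
  | zero =>
    simp [pvD]
  | succ k ih =>
    have hk' : k ≤ s2.length := by omega
    rw [List.range'_concat, List.foldl_append, ih hk']
    have e2 : 1 + 1 * k = k + 1 := by omega
    simp only [List.foldl_cons, List.foldl_nil, e2, stepB_in]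
    have h1 : ((List.range (s2.length + 1)).map (fun j => pvD s1 s2 i j)).getD (k + 1 - 1) 0
        = pvD s1 s2 i k := by
      have : k + 1 - 1 = k := by omega
      rw [this, gmr _ _ _ (by omega)]
    have h2 : ((List.range (s2.length + 1)).map (fun j => pvD s1 s2 i j)).getD (k + 1) 0
        = pvD s1 s2 i (k + 1) := gmr _ _ _ (by omega) 0
    have h3 : ((List.range (k + 1)).map (fun j => pvD s1 s2 (i + 1) j)).getD (k + 1 - 1) 0
        = pvD s1 s2 (i + 1) k := by
      have : k + 1 - 1 = k := by omega
      rw [this, gmr _ _ _ (by omega)]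
    rw [h1, h2, h3]
    have hcell : min (pvCost (s1.getD (i + 1 - 1) ' ') (s2.getD (k + 1 - 1) ' ') + pvD s1 s2 i k)
          (min (GAP_PENALTY + pvD s1 s2 i (k + 1)) (GAP_PENALTY + pvD s1 s2 (i + 1) k))
        = pvD s1 s2 (i + 1) (k + 1) := by
      rw [pvD]
      rfl
    rw [hcell, List.range_succ (n := k + 1), List.map_append]
    rfl

lemma b_outer (s1 s2 : List Char) (t : Nat) :
    (List.range' 1 t).foldl (stepB_out s1 s2)
      ([pvD s1 s2 0 s2.length], (List.range (s2.length + 1)).map (fun j => pvD s1 s2 0 j))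
    = ((List.range (t + 1)).map (fun i => pvD s1 s2 i s2.length),
       (List.range (s2.length + 1)).map (fun j => pvD s1 s2 t j)) := by
  induction t with
  | zero => simp
  | succ t ih =>
    rw [List.range'_concat, List.foldl_append, ih]
    have e2 : 1 + 1 * t = t + 1 := by omega
    simp only [List.foldl_cons, List.foldl_nil, e2, stepB_out]
    rw [b_inner s1 s2 t s2.length (le_refl _)]
    have hlast : ((List.range (s2.length + 1)).map (fun j => pvD s1 s2 (t + 1) j)).getD s2.length 0
        = pvD s1 s2 (t + 1) s2.length := gmr _ _ _ (by omega) 0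
    rw [hlast, List.range_succ (n := t + 1), List.map_append]
    rfl

lemma alt_eq (str1 str2 : String) :
    dp_efficient_alt str1 str2
    = (List.range (str1.toList.length + 1)).map (fun i => pvD str1.toList str2.toList i str2.toList.length) := by
  simp only [dp_efficient_alt]
  have hrow0 : (List.range (str2.toList.length + 1)).map (fun (j : Nat) => (j : Int) * GAP_PENALTY)
      = (List.range (str2.toList.length + 1)).map (fun j => pvD str1.toList str2.toList 0 j) := by
    apply List.map_congr_left
    intro j _
    simp [pvD]
  have hget : ((List.range (str2.toList.length + 1)).map (fun j => pvD str1.toList str2.toList 0 j)).getD str2.toList.length 0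
      = pvD str1.toList str2.toList 0 str2.toList.length := gmr _ _ _ (by omega) 0
  rw [hrow0, hget, b_outer]

-- ===== VERDICT (by name: the statements are the Claim_ definitions above) =====
theorem dp_efficient_spec : Claim_unchanged_dp_efficient := by
  intro str1 str2 _ _
  unfold Spec_dp_efficient
  intro hD
  unfold D_dp_efficient at hD
  rw [a_eq_col, col_eq, alt_eq]
  by_cases hm : str2.toList.length = 0
  · have hs2 : str2.toList = [] := List.length_eq_zero_iff.mp hm
    have hs1 : str1.toList = [] := by
      by_contra hs1
      exact hD ⟨hs2, hs1⟩
    rw [if_pos hm, hs1, hs2]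
    simp [pvD]
  · rw [if_neg hm]

theorem dp_efficient_changed : Claim_changed_dp_efficient := by
  unfold Claim_changed_dp_efficient; decide

theorem dp_efficient_tight : Claim_exact_dp_efficient := by
  intro str1 str2 _ _ hD h
  obtain ⟨hs2, hs1⟩ := hD
  have hn : 0 < str1.toList.length := List.length_pos_iff.mpr hs1
  have hm : str2.toList.length = 0 := by rw [hs2]; rfl
  rw [a_eq_col, col_eq, alt_eq, hm, if_pos rfl] at h
  have h1 := congrArg (fun l => l.getD 1 (0 : Int)) h
  simp only at h1
  rw [List.getD_eq_getElem _ _ (by simpa using hn), List.getElem_replicate,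
    gmr _ _ _ (by omega), pvD_zero] at h1
  norm_num [GAP_PENALTY] at h1
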